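-- pv_equiv track=rewrite | github.com/ianshank/langgraph_multi_agent_mcts | src/benchmark/harness_bridge.py | _fence_goal
-- ===== SOURCE A (Python) =====
-- _MIN_FENCE_BACKTICKS: int = 3
--
-- def _fence_goal(goal: str) -> str:
--     """Wrap ``goal`` in a fence at least one backtick longer than any
--     run of backticks already inside the value.
--
--     This protects the spec parser from goals that themselves contain
--     ATX headers, ``---`` separators, or triple-backtick code fences.
--     """
--     # Detect the longest run of backticks inside the goal so we can
--     # pick a fence that won't be terminated prematurely.
--     max_run = 0
--     run = 0
--     for ch in goal:
--         if ch == "`":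
--             run += 1
--             max_run = max(max_run, run)
--         else:
--             run = 0
--     fence = "`" * max(_MIN_FENCE_BACKTICKS, max_run + 1)
--     return f"{fence}\n{goal}\n{fence}"
-- ===== SOURCE B (Python) =====
-- _MIN_FENCE_BACKTICKS: int = 3
--
-- def _fence_goal(goal: str) -> str:
--     """Wrap ``goal`` in the shortest fence (at least 3 backticks) that
--     does not occur inside it."""
--     n = _MIN_FENCE_BACKTICKS
--     while "`" * n in goal:
--         n += 1
--     fence = "`" * n
--     return f"{fence}\n{goal}\n{fence}"
-- ===== Notes on version B (the rewrite author's own statement) =====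
-- stated objective: idiomatic
-- what changed: B replaces A's char-by-char run-tracking state machine by a grow-the-fence loop: start at 3 backticks and lengthen the candidate fence while it still occurs as a substring of the goal.
import Mathlib
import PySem

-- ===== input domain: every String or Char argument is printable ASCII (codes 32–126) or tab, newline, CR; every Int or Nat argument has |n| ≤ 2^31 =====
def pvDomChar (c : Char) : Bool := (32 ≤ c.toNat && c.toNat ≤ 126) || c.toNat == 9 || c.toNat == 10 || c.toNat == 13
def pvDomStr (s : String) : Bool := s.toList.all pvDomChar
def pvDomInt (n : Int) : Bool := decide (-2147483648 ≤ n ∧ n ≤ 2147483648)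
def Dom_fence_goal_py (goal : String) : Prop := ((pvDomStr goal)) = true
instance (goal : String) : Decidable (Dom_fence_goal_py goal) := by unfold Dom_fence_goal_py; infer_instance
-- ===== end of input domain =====

-- B replaces A's char-by-char longest-backtick-run state machine by an idiomatic
-- grow-the-fence loop (lengthen the candidate fence while it is still a substring).

-- ===== PORT A =====
-- A's loop: state (max_run, run), updated per character.
def fence_goal_py (goal : String) : String :=
  let p := goal.toList.foldl
    (fun (p : Nat × Nat) ch => if ch = '`' then (max p.1 (p.2 + 1), p.2 + 1) else (p.1, 0))
    (0, 0)
  let fence := List.replicate (max 3 (p.1 + 1)) '`'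
  String.mk (fence ++ '\n' :: goal.toList ++ '\n' :: fence)

-- ===== PORT B =====
-- B's loop: `while "`" * n in goal: n += 1` (terminates since a fence longer than the goal cannot occur in it).
def fgLoop (goal : List Char) (n : Nat) : Nat :=
  if h : PySem.Chars.isIn (List.replicate n '`') goal = true then
    fgLoop goal (n + 1)
  else n
termination_by goal.length + 1 - n
decreasing_by
  have hinf := (PySem.Chars.isIn_iff_infix _ _).mp h
  have := hinf.length_le
  simp at this
  omega

def fence_goal_py_alt (goal : String) : String :=
  let n := fgLoop goal.toList 3
  let fence := List.replicate n '`'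
  String.mk (fence ++ '\n' :: goal.toList ++ '\n' :: fence)

-- ===== PRECONDITION & SPEC =====
def Spec_fence_goal_py (goal : String) (out : String) : Prop := out = fence_goal_py_alt goal
instance (goal : String) (out : String) : Decidable (Spec_fence_goal_py goal out) := by unfold Spec_fence_goal_py; infer_instance

-- ===== CLAIM (what is proved, stated in full; the proofs are below) =====
def Claim_equal_fence_goal_py : Prop := ∀ (goal : String), Dom_fence_goal_py goal → Spec_fence_goal_py goal (fence_goal_py goal)

-- ===== LEMMAS AND PROOFS =====

-- A's fold step and its result, abbreviated for the lemmas.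
def fgStep (p : Nat × Nat) (ch : Char) : Nat × Nat :=
  if ch = '`' then (max p.1 (p.2 + 1), p.2 + 1) else (p.1, 0)

def fgMax (cs : List Char) : Nat := (cs.foldl fgStep (0, 0)).1

theorem fgStep_tick (p : Nat × Nat) : fgStep p '`' = (max p.1 (p.2 + 1), p.2 + 1) := by
  simp [fgStep]

theorem fgStep_other (p : Nat × Nat) (c : Char) (h : ¬ c = '`') : fgStep p c = (p.1, 0) := by
  simp [fgStep, h]

-- the first component of the fold never decreases
theorem fgFold_fst_mono (cs : List Char) (m r : Nat) : m ≤ (cs.foldl fgStep (m, r)).1 := by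
  induction cs generalizing m r with
  | nil => simp
  | cons c cs ih =>
    rw [List.foldl_cons]
    by_cases h : c = '`'
    · subst h; rw [fgStep_tick]
      exact le_trans (le_max_left _ _) (ih _ _)
    · rw [fgStep_other _ _ h]; exact ih _ _

-- folding over a pure backtick block
theorem fgFold_replicate (k m r : Nat) (h : r ≤ m) :
    (List.foldl fgStep (m, r) (List.replicate k '`')) = (max m (r + k), r + k) := by
  induction k generalizing m r with
  | zero => simp; omega
  | succ k ih =>
    rw [List.replicate_succ, List.foldl_cons, fgStep_tick,
        ih (max m (r + 1)) (r + 1) (le_max_right _ _)]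
    simp only [Prod.mk.injEq]
    omega

-- invariant: second component ≤ first
theorem fgFold_snd_le_fst (cs : List Char) (m r : Nat) (h : r ≤ m) :
    (cs.foldl fgStep (m, r)).2 ≤ (cs.foldl fgStep (m, r)).1 := by
  induction cs generalizing m r with
  | nil => simpa
  | cons c cs ih =>
    rw [List.foldl_cons]
    by_cases hc : c = '`'
    · subst hc; rw [fgStep_tick]; exact ih _ _ (le_max_right _ _)
    · rw [fgStep_other _ _ hc]; exact ih _ _ (Nat.zero_le _)

-- direction 2: a backtick block inside cs bounds fgMax from below
theorem le_fgMax_of_infix (cs : List Char) (k : Nat)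
    (h : List.replicate k '`' <:+: cs) : k ≤ fgMax cs := by
  obtain ⟨u, v, rfl⟩ := h
  unfold fgMax
  rw [List.foldl_append, List.foldl_append]
  set p := u.foldl fgStep (0, 0) with hp
  have hle : p.2 ≤ p.1 := fgFold_snd_le_fst _ _ _ (le_refl 0)
  rw [show p = (p.1, p.2) from rfl, fgFold_replicate k p.1 p.2 hle]
  have := fgFold_fst_mono v (max p.1 (p.2 + k)) (p.2 + k)
  omega

-- direction 1: a run of length fgMax actually occurs (with a suffix invariant for the current run)
theorem fgMax_infix (cs : List Char) :
    List.replicate (cs.foldl fgStep (0, 0)).2 '`' <:+ cs ∧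
    List.replicate (cs.foldl fgStep (0, 0)).1 '`' <:+: cs := by
  induction cs using List.reverseRecOn with
  | nil => simp
  | append_singleton cs c ih =>
    obtain ⟨ih2, ih1⟩ := ih
    rw [List.foldl_append, List.foldl_cons, List.foldl_nil]
    set p := cs.foldl fgStep (0, 0) with hp
    by_cases hc : c = '`'
    · subst hc
      rw [fgStep_tick]
      have hsuf : List.replicate (p.2 + 1) '`' <:+ cs ++ ['`'] := by
        obtain ⟨t, ht⟩ := ih2
        exact ⟨t, by rw [List.replicate_succ', ← List.append_assoc, ht]⟩
      refine ⟨hsuf, ?_⟩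
      by_cases hmax : p.2 + 1 ≤ p.1
      · rw [show (max p.1 (p.2 + 1), p.2 + 1).1 = p.1 by simp; omega]
        exact ih1.trans ⟨[], ['`'], by simp⟩
      · rw [show (max p.1 (p.2 + 1), p.2 + 1).1 = p.2 + 1 by simp; omega]
        exact hsuf.isInfix
    · rw [fgStep_other _ _ hc]
      refine ⟨by simp, ih1.trans ⟨[], [c], by simp⟩⟩

-- characterisation: replicate k '`' occurs in cs iff k ≤ fgMax cs
theorem infix_iff_le_fgMax (cs : List Char) (k : Nat) :
    List.replicate k '`' <:+: cs ↔ k ≤ fgMax cs := by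
  constructor
  · exact le_fgMax_of_infix cs k
  · intro h
    have h1 := (fgMax_infix cs).2
    have hpre : List.replicate k '`' <+: List.replicate (fgMax cs) '`' := by
      refine ⟨List.replicate (fgMax cs - k) '`', ?_⟩
      rw [← List.replicate_add]
      congr 1
      omega
    exact hpre.isInfix.trans h1

-- B's loop returns max n (fgMax + 1) (fuel d bounds the remaining iterations)
theorem fgLoop_eq (cs : List Char) (d n : Nat) (hd : fgMax cs + 1 ≤ n + d) :
    fgLoop cs n = max n (fgMax cs + 1) := by
  induction d generalizing n with
  | zero =>
    rw [fgLoop, dif_neg]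
    · omega
    · simp only [PySem.Chars.isIn_iff_infix, infix_iff_le_fgMax]
      omega
  | succ d ih =>
    by_cases h : n ≤ fgMax cs
    · rw [fgLoop, dif_pos]
      · rw [ih (n + 1) (by omega)]; omega
      · simp only [PySem.Chars.isIn_iff_infix, infix_iff_le_fgMax]; exact h
    · rw [fgLoop, dif_neg]
      · omega
      · simp only [PySem.Chars.isIn_iff_infix, infix_iff_le_fgMax]; omega

-- ===== VERDICT (by name: the statement is the Claim_ definition above) =====
theorem fence_goal_py_spec : Claim_equal_fence_goal_py := by
  intro goal _
  unfold Spec_fence_goal_py fence_goal_py fence_goal_py_alt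
  rw [show fgLoop goal.toList 3 = max 3 (fgMax goal.toList + 1) from
        fgLoop_eq goal.toList (fgMax goal.toList + 1) 3 (by omega)]
  rfl
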